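-- pv_equiv track=rewrite | github.com/minyklc/a-maze-ing | generator.py | forty_two
-- ===== SOURCE A (Python) =====
-- def forty_two(height, width) -> list[list[int]] | list:
--     total = []
--
--     if height >= 7 and width >= 9:
--         pos_x = int((width - 7) / 2)
--         pos_y = int((height - 5) / 2)
--         x = pos_x
--         y = pos_y
--         menu = [
--             [0, 4, 1, 1],
--             [0, 6],
--             [0, 1, 1, 2, 1, 1],
--             [2, 2],
--             [2, 2, 1, 1]
--         ]
--         for m in menu:
--             for i in m:
--                 x += i
--                 total.append([x, y])
--             x = pos_x
--             y += 1
--     return total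
-- ===== SOURCE B (Python) =====
-- # '42' glyph as fixed absolute offsets; shift by the centering origin.
-- _OFFSETS = [
--     (0, 0), (4, 0), (5, 0), (6, 0),
--     (0, 1), (6, 1),
--     (0, 2), (1, 2), (2, 2), (4, 2), (5, 2), (6, 2),
--     (2, 3), (4, 3),
--     (2, 4), (4, 4), (5, 4), (6, 4),
-- ]
--
-- def forty_two(height, width) -> list[list[int]] | list:
--     if height < 7 or width < 9:
--         return []
--     pos_x = (width - 7) // 2
--     pos_y = (height - 5) // 2
--     return [[pos_x + dx, pos_y + dy] for dx, dy in _OFFSETS]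
-- ===== Notes on version B (the rewrite author's own statement) =====
-- stated objective: simpler
-- what changed: Replaces the running-accumulator nested loop over relative increments with a single comprehension over a precomputed table of the glyph's absolute (dx,dy) offsets.
import Mathlib
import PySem

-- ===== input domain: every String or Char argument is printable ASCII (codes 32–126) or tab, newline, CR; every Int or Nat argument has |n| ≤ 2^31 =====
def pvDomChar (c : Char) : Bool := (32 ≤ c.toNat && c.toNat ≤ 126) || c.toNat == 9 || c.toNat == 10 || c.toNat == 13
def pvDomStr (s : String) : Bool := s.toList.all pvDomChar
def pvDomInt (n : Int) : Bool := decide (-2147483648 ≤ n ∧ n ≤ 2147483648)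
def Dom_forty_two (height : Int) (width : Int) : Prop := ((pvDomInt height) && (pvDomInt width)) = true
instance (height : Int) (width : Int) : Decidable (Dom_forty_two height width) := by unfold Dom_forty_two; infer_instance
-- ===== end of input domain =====

-- B replaces A's nested running-accumulator loop by one map over a fixed table of
-- absolute glyph offsets (objective: simpler).

-- ===== PORT A =====
-- Python's int((width-7)/2) truncates toward zero; under the guard width-7 ≥ 2 > 0
-- (resp. height-5 ≥ 2 > 0) this equals floor division, ported exactly as floordiv.
def forty_two (height : Int) (width : Int) : List (List Int) :=
  if height ≥ 7 ∧ width ≥ 9 then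
    let pos_x := PySem.Int.floordiv (width - 7) 2
    let pos_y := PySem.Int.floordiv (height - 5) 2
    let menu : List (List Int) :=
      [[0, 4, 1, 1], [0, 6], [0, 1, 1, 2, 1, 1], [2, 2], [2, 2, 1, 1]]
    (menu.foldl
      (fun (st : List (List Int) × Int × Int) m =>
        let inner := m.foldl
          (fun (p : List (List Int) × Int) i =>
            (p.1 ++ [[p.2 + i, st.2.2]], p.2 + i)) (st.1, st.2.1)
        (inner.1, pos_x, st.2.2 + 1))
      ([], pos_x, pos_y)).1
  else []

-- ===== PORT B =====
def pvOffsets : List (Int × Int) :=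
  [(0, 0), (4, 0), (5, 0), (6, 0),
   (0, 1), (6, 1),
   (0, 2), (1, 2), (2, 2), (4, 2), (5, 2), (6, 2),
   (2, 3), (4, 3),
   (2, 4), (4, 4), (5, 4), (6, 4)]

def forty_two_alt (height : Int) (width : Int) : List (List Int) :=
  if height < 7 ∨ width < 9 then []
  else
    let pos_x := PySem.Int.floordiv (width - 7) 2
    let pos_y := PySem.Int.floordiv (height - 5) 2
    pvOffsets.map (fun d => [pos_x + d.1, pos_y + d.2])

-- ===== PRECONDITION & SPEC =====
def Spec_forty_two (height : Int) (width : Int) (out : List (List Int)) : Prop := out = forty_two_alt height width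
instance (height : Int) (width : Int) (out : List (List Int)) : Decidable (Spec_forty_two height width out) := by unfold Spec_forty_two; infer_instance

-- ===== CLAIM (what is proved, stated in full; the proofs are below) =====
def Claim_equal_forty_two : Prop := ∀ (height : Int) (width : Int), Dom_forty_two height width → Spec_forty_two height width (forty_two height width)

-- ===== LEMMAS AND PROOFS =====

-- ===== VERDICT (by name: the statement is the Claim_ definition above) =====
theorem forty_two_spec : Claim_equal_forty_two := by
  intro height width _
  unfold Spec_forty_two forty_two forty_two_alt pvOffsets
  by_cases h : height ≥ 7 ∧ width ≥ 9
  · rw [if_pos h, if_neg (by omega)]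
    simp [List.foldl, List.map]
    omega
  · rw [if_neg h, if_pos (by omega)]
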